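-- pv_equiv track=rewrite | github.com/ghost162626/sdgsdg | main.py | remove_whitelist_from_code
-- ===== SOURCE A (Python) =====
-- def remove_whitelist_from_code(existing_code, player_id):
--     lines = existing_code.split('\n')
--     new_lines = []
--     skip_next = False
--     for i, line in enumerate(lines):
--         if f'["{player_id}"]' in line:
--             skip_next = True
--             continue
--         elif skip_next and line.strip().startswith("}"):
--             skip_next = False
--             new_lines.append(line)
--         elif not skip_next:
--             new_lines.append(line)
--     return '\n'.join(new_lines)
-- ===== SOURCE B (Python) =====
-- def remove_whitelist_from_code(existing_code, player_id):
--     marker = f'["{player_id}"]'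
--     # stage 1: split the lines into segments separated by marker lines
--     # (the marker lines themselves are dropped)
--     segments = []
--     cur = []
--     for line in existing_code.split('\n'):
--         if marker in line:
--             segments.append(cur)
--             cur = []
--         else:
--             cur.append(line)
--     segments.append(cur)
--     # stage 2: the first segment precedes any marker and is kept whole;
--     # every later segment starts a removed block and is kept only from
--     # its first closing-brace line onward
--     out = list(segments[0])
--     for seg in segments[1:]:
--         k = 0
--         while k < len(seg) and not seg[k].strip().startswith('}'):
--             k += 1
--         out.extend(seg[k:])
--     return '\n'.join(out)
-- ===== Notes on version B (the rewrite author's own statement) =====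
-- stated objective: alternative
-- what changed: Replaces A's single-pass skip_next state machine by two staged passes: first split the lines into segments separated by marker lines, then emit the first segment whole and each later segment only from its first closing-brace line onward.
import Mathlib
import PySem

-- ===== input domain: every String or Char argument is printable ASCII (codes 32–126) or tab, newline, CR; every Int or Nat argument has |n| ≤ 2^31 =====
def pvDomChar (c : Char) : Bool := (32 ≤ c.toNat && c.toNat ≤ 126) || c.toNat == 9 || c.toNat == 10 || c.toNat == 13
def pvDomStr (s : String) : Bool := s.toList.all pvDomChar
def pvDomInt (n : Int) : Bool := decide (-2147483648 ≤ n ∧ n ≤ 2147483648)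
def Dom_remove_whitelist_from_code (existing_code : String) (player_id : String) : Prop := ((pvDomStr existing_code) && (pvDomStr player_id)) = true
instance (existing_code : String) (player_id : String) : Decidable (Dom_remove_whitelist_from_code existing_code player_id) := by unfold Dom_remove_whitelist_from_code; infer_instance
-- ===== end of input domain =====

-- B replaces A's single-pass skip_next state machine by two staged passes:
-- split the lines into segments at marker lines, then trim each later segment
-- to start at its first closing-brace line (alternative decomposition, same cost).

-- ===== PORT A =====
-- A's loop body: the if/elif/elif chain updating (new_lines, skip_next), branches in source order
def aStep (marker : String) (st : List String × Bool) (line : String) : List String × Bool :=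
  if PySem.Str.isIn marker line then (st.1, true)
  else if st.2 && PySem.Str.startswith (PySem.Str.strip line) "}" then (st.1 ++ [line], false)
  else if !st.2 then (st.1 ++ [line], st.2)
  else st

-- A's for-loop over the lines carrying (new_lines, skip_next)
def remove_whitelist_from_code (existing_code : String) (player_id : String) : String :=
  let lines := (PySem.Str.split? existing_code "\n").getD []
  let marker := "[\"" ++ player_id ++ "\"]"
  let st := lines.foldl (aStep marker) ([], false)
  PySem.Str.join "\n" st.1

-- ===== PORT B =====
-- B stage 1: the splitting loop carrying (segments, cur)
def bSplitStep (marker : String) (st : List (List String) × List String) (line : String) : List (List String) × List String :=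
  if PySem.Str.isIn marker line then (st.1 ++ [st.2], []) else (st.1, st.2 ++ [line])

-- B stage 2 inner while loop: seg[k:] for the first k with a closing-brace line
def bTrim (seg : List String) : List String :=
  seg.dropWhile (fun l => !PySem.Str.startswith (PySem.Str.strip l) "}")

def remove_whitelist_from_code_alt (existing_code : String) (player_id : String) : String :=
  let marker := "[\"" ++ player_id ++ "\"]"
  let st := ((PySem.Str.split? existing_code "\n").getD []).foldl (bSplitStep marker) ([], [])
  let segments := st.1 ++ [st.2]
  match segments with
  | [] => PySem.Str.join "\n" []
  | s0 :: rest => PySem.Str.join "\n" (rest.foldl (fun out seg => out ++ bTrim seg) s0)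

-- ===== PRECONDITION & SPEC =====
def Spec_remove_whitelist_from_code (existing_code : String) (player_id : String) (out : String) : Prop := out = remove_whitelist_from_code_alt existing_code player_id
instance (existing_code : String) (player_id : String) (out : String) : Decidable (Spec_remove_whitelist_from_code existing_code player_id out) := by unfold Spec_remove_whitelist_from_code; infer_instance

-- ===== CLAIM (what is proved, stated in full; the proofs are below) =====
def Claim_equal_remove_whitelist_from_code : Prop := ∀ (existing_code : String) (player_id : String), Dom_remove_whitelist_from_code existing_code player_id → Spec_remove_whitelist_from_code existing_code player_id (remove_whitelist_from_code existing_code player_id)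

-- ===== LEMMAS AND PROOFS =====

-- proof-side pure splitter: (head segment, later segments) of the split at marker lines
def splitRec (marker : String) : List String → List String × List (List String)
  | [] => ([], [])
  | l :: rest =>
    let p := splitRec marker rest
    if PySem.Str.isIn marker l then ([], p.1 :: p.2) else (l :: p.1, p.2)

-- B's stage-1 fold computes splitRec (with accumulated segments/cur prepended)
theorem bFold_eq (marker : String) (lines : List String) : ∀ (segs : List (List String)) (cur : List String),
    (lines.foldl (bSplitStep marker) (segs, cur)).1 ++ [(lines.foldl (bSplitStep marker) (segs, cur)).2]
      = segs ++ ((cur ++ (splitRec marker lines).1) :: (splitRec marker lines).2) := by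
  induction lines with
  | nil => intro segs cur; simp [splitRec]
  | cons l rest ih =>
    intro segs cur
    simp only [List.foldl_cons, bSplitStep, splitRec]
    by_cases hm : PySem.Chars.isIn marker.toList l.toList = true
    · simp [hm, ih]
    · simp [hm, ih]

-- B's stage-2 fold flattens the trimmed segments
theorem bOut_eq (rest : List (List String)) : ∀ (s0 : List String),
    rest.foldl (fun out seg => out ++ bTrim seg) s0 = s0 ++ (rest.map bTrim).flatten := by
  induction rest with
  | nil => intro s0; simp
  | cons seg rest ih => intro s0; simp [ih]

-- loop invariant for A: from skip=false the fold yields the first segment whole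
-- then the trimmed later segments; from skip=true it trims the current segment too
theorem aFold_eq (marker : String) (lines : List String) : ∀ acc : List String,
    (lines.foldl (aStep marker) (acc, false)).1
      = acc ++ (splitRec marker lines).1 ++ (((splitRec marker lines).2).map bTrim).flatten ∧
    (lines.foldl (aStep marker) (acc, true)).1
      = acc ++ bTrim (splitRec marker lines).1 ++ (((splitRec marker lines).2).map bTrim).flatten := by
  induction lines with
  | nil => intro acc; simp [splitRec, bTrim]
  | cons l rest ih =>
    intro acc
    constructor
    · simp only [List.foldl_cons, aStep, splitRec]
      by_cases hm : PySem.Chars.isIn marker.toList l.toList = true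
      · simp [hm, (ih acc).2, bTrim]
      · simp [hm, (ih (acc ++ [l])).1]
    · simp only [List.foldl_cons, aStep, splitRec]
      by_cases hm : PySem.Chars.isIn marker.toList l.toList = true
      · simp [hm, (ih acc).2, bTrim]
      · by_cases hc : PySem.Chars.startswith (PySem.Chars.strip l.toList) ['}'] = true
        · simp [hm, hc, (ih (acc ++ [l])).1, bTrim]
        · simp [hm, hc, (ih acc).2, bTrim]

-- ===== VERDICT (by name: the statement is the Claim_ definition above) =====
theorem remove_whitelist_from_code_spec : Claim_equal_remove_whitelist_from_code := by
  intro existing_code player_id _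
  unfold Spec_remove_whitelist_from_code remove_whitelist_from_code remove_whitelist_from_code_alt
  set marker := "[\"" ++ player_id ++ "\"]" with hmk
  set lines := (PySem.Str.split? existing_code "\n").getD [] with hl
  have ha := (aFold_eq marker lines []).1
  have hb := bFold_eq marker lines [] []
  simp only [List.nil_append] at ha hb
  rcases hs : splitRec marker lines with ⟨s, ss⟩
  rw [hs] at ha hb
  simp only at ha hb
  simp only [hb, ha, bOut_eq]
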